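-- pv_equiv track=rewrite | github.com/Schahrjar/ExHap | ExHap.py | cluster_blocks
-- ===== SOURCE A (Python) =====
-- def cluster_blocks(positions, genotypes, max_distance):
--     blocks = []
--     block = []
--     for i in range(len(positions)):
--         chrom, pos = positions[i]
--         if not block:
--             block = [positions[i]]
--         else:
--             prev_chrom, prev_pos = block[-1]
--             if chrom == prev_chrom and (pos - prev_pos <= max_distance):
--                 block.append(positions[i])
--             else:
--                 blocks.append(block)
--                 block = [positions[i]]
--     if block:
--         blocks.append(block)
--     return blocks
-- ===== SOURCE B (Python) =====
-- def cluster_blocks(positions, genotypes, max_distance):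
--     blocks = []
--     for chrom, pos in reversed(positions):
--         if blocks and blocks[0][0][0] == chrom and blocks[0][0][1] - pos <= max_distance:
--             blocks[0].insert(0, (chrom, pos))
--         else:
--             blocks.insert(0, [(chrom, pos)])
--     return blocks
-- ===== Notes on version B (the rewrite author's own statement) =====
-- stated objective: alternative
-- what changed: B builds the block list back-to-front: it iterates over reversed(positions) and either prepends the element into the current front block or opens a new front block, eliminating A's separate current-block accumulator and final flush step.
import Mathlib
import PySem

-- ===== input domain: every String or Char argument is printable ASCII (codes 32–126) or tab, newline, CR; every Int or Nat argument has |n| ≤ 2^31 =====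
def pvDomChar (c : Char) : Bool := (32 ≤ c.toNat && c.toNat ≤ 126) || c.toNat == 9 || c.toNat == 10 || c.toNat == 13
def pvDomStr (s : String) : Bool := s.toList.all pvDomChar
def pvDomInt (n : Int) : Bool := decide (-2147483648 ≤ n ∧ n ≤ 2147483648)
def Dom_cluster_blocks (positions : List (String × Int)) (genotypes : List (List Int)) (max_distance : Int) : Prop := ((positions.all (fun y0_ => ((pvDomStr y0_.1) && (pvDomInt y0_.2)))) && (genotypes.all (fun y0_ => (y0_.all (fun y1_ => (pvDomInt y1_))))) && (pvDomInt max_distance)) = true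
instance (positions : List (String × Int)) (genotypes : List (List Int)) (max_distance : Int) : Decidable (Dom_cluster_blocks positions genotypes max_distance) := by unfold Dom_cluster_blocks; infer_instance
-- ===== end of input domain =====

-- B builds the block list back-to-front (reversed traversal, prepend into the front
-- block or open a new one) instead of A's forward loop with a current-block
-- accumulator and final flush; objective: alternative decomposition, same cost class.

-- ===== PORT A =====
-- one loop step of A: state (blocks, block), next element x = positions[i]
def stepA (d : Int) (s : List (List (String × Int)) × List (String × Int))
    (x : String × Int) : List (List (String × Int)) × List (String × Int) :=
  match s.2 with
  | [] => (s.1, [x])                                  -- if not block: block = [positions[i]]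
  | h :: t =>
      let p := (h :: t).getLast (by simp)             -- prev_chrom, prev_pos = block[-1]
      if x.1 = p.1 ∧ x.2 - p.2 ≤ d then (s.1, (h :: t) ++ [x])
      else (s.1 ++ [h :: t], [x])

def cluster_blocks (positions : List (String × Int)) (genotypes : List (List Int)) (max_distance : Int) : List (List (String × Int)) :=
  let s := positions.foldl (stepA max_distance) ([], [])
  if s.2 = [] then s.1 else s.1 ++ [s.2]              -- if block: blocks.append(block)

-- ===== PORT B =====
-- one loop step of B: blocks so far (of the tail), next element x from reversed(positions)
def stepB (d : Int) (blocks : List (List (String × Int)))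
    (x : String × Int) : List (List (String × Int)) :=
  match blocks with
  | (y :: g) :: rest =>
      if y.1 = x.1 ∧ y.2 - x.2 ≤ d then (x :: y :: g) :: rest   -- blocks[0].insert(0, x)
      else [x] :: (y :: g) :: rest                              -- blocks.insert(0, [x])
  | bs => [x] :: bs

def cluster_blocks_alt (positions : List (String × Int)) (genotypes : List (List Int)) (max_distance : Int) : List (List (String × Int)) :=
  positions.reverse.foldl (stepB max_distance) []     -- for (chrom,pos) in reversed(positions)

-- ===== PRECONDITION & SPEC =====
def Spec_cluster_blocks (positions : List (String × Int)) (genotypes : List (List Int)) (max_distance : Int) (out : List (List (String × Int))) : Prop := out = cluster_blocks_alt positions genotypes max_distance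
instance (positions : List (String × Int)) (genotypes : List (List Int)) (max_distance : Int) (out : List (List (String × Int))) : Decidable (Spec_cluster_blocks positions genotypes max_distance out) := by unfold Spec_cluster_blocks; infer_instance

-- ===== CLAIM (what is proved, stated in full; the proofs are below) =====
def Claim_equal_cluster_blocks : Prop := ∀ (positions : List (String × Int)) (genotypes : List (List Int)) (max_distance : Int), Dom_cluster_blocks positions genotypes max_distance → Spec_cluster_blocks positions genotypes max_distance (cluster_blocks positions genotypes max_distance)

-- ===== LEMMAS AND PROOFS =====

-- canonical recursive chunking both ports are proved equal to
def chain (d : Int) (p : String × Int) : List (String × Int) → List (String × Int) × List (String × Int)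
  | [] => ([], [])
  | x :: xs =>
      if x.1 = p.1 ∧ x.2 - p.2 ≤ d then
        let gr := chain d x xs
        (x :: gr.1, gr.2)
      else ([], x :: xs)

lemma chain_snd_length (d : Int) (p : String × Int) (xs : List (String × Int)) :
    (chain d p xs).2.length ≤ xs.length := by
  induction xs generalizing p with
  | nil => simp [chain]
  | cons x xs ih =>
      simp only [chain]
      split
      · exact le_trans (ih x) (Nat.le_succ _)
      · simp

def canon (d : Int) : List (String × Int) → List (List (String × Int))
  | [] => []
  | x :: xs => (x :: (chain d x xs).1) :: canon d (chain d x xs).2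
termination_by xs => xs.length
decreasing_by
  exact Nat.lt_succ_of_le (chain_snd_length d x xs)

lemma canon_cons (d : Int) (x : String × Int) (xs : List (String × Int)) :
    canon d (x :: xs) = (x :: (chain d x xs).1) :: canon d (chain d x xs).2 := by
  rw [canon]

-- A's final flush
def finishA (s : List (List (String × Int)) × List (String × Int)) : List (List (String × Int)) :=
  if s.2 = [] then s.1 else s.1 ++ [s.2]

lemma foldlA_inv (d : Int) (xs : List (String × Int)) :
    ∀ (blocks : List (List (String × Int))) (b : List (String × Int)) (p : String × Int)
      (hb : b ≠ []) (_ : b.getLast hb = p),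
    finishA (xs.foldl (stepA d) (blocks, b)) =
      blocks ++ (b ++ (chain d p xs).1) :: canon d (chain d p xs).2 := by
  induction xs with
  | nil =>
      intro blocks b p hb hp
      simp [finishA, chain, canon, hb]
  | cons x xs ih =>
      intro blocks b p hb hp
      obtain ⟨h, t, rfl⟩ : ∃ h t, b = h :: t := by
        cases b with
        | nil => exact absurd rfl hb
        | cons h t => exact ⟨h, t, rfl⟩
      have hl : (h :: t).getLast (by simp) = p := hp
      simp only [List.foldl_cons, stepA, hl, chain]
      by_cases hc : x.1 = p.1 ∧ x.2 - p.2 ≤ d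
      · rw [if_pos hc, if_pos hc, ih blocks ((h :: t) ++ [x]) x (by simp) (by simp)]
        simp
      · rw [if_neg hc, if_neg hc, ih (blocks ++ [h :: t]) [x] x (by simp) (by simp), canon_cons]
        simp

lemma clusterA_eq_canon (positions : List (String × Int)) (genotypes : List (List Int)) (d : Int) :
    cluster_blocks positions genotypes d = canon d positions := by
  cases positions with
  | nil => simp [cluster_blocks, canon]
  | cons x xs =>
      have h1 : cluster_blocks (x :: xs) genotypes d
          = finishA ((x :: xs).foldl (stepA d) ([], [])) := by
        simp [cluster_blocks, finishA]
      rw [h1]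
      have h2 : (x :: xs).foldl (stepA d) ([], []) = xs.foldl (stepA d) ([], [x]) := by
        simp [stepA]
      rw [h2, foldlA_inv d xs [] [x] x (by simp) (by simp), canon_cons]
      simp

lemma foldrB_eq_canon (d : Int) (xs : List (String × Int)) :
    xs.foldr (fun x bs => stepB d bs x) [] = canon d xs := by
  induction xs with
  | nil => simp [canon]
  | cons x xs ih =>
      rw [List.foldr_cons, ih]
      cases xs with
      | nil => simp [canon, canon_cons, chain, stepB]
      | cons y ys =>
          rw [canon_cons d x (y :: ys), canon_cons d y ys]
          simp only [stepB, chain]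
          by_cases hc : y.1 = x.1 ∧ y.2 - x.2 ≤ d
          · rw [if_pos hc, if_pos hc]
          · rw [if_neg hc, if_neg hc, ← canon_cons]

lemma clusterB_eq_canon (positions : List (String × Int)) (genotypes : List (List Int)) (d : Int) :
    cluster_blocks_alt positions genotypes d = canon d positions := by
  unfold cluster_blocks_alt
  rw [List.foldl_reverse]
  exact foldrB_eq_canon d positions

-- ===== VERDICT (by name: the statement is the Claim_ definition above) =====
theorem cluster_blocks_spec : Claim_equal_cluster_blocks := by
  intro positions genotypes max_distance _
  unfold Spec_cluster_blocks
  rw [clusterA_eq_canon positions genotypes max_distance,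
      clusterB_eq_canon positions genotypes max_distance]
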